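-- pv_equiv track=rewrite | github.com/MrBrantCode/unitest_baseline | mut_generate/mist_train_taco/taco_5909/solution.py | form_alternating_line
-- ===== SOURCE A (Python) =====
-- from itertools import repeat, zip_longest
--
-- def form_alternating_line(n: int, m: int) -> str:
--     """
--     Forms a line of children with boys ('B') and girls ('G') alternating as much as possible.
--
--     Parameters:
--     - n (int): The number of boys.
--     - m (int): The number of girls.
--
--     Returns:
--     - str: A string representing the line of children.
--     """
--     boys = repeat('B', n)
--     girls = repeat('G', m)
--
--     if n > m:
--         pairs = zip_longest(boys, girls, fillvalue=None)
--     else: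
--         pairs = zip_longest(girls, boys, fillvalue=None)
--
--     result = (y for x in pairs for y in x if y is not None)
--     return ''.join(result)
-- ===== SOURCE B (Python) =====
-- def form_alternating_line(n: int, m: int) -> str:
--     # counts clamp at 0 like itertools.repeat does for negative counts
--     b, g = max(n, 0), max(m, 0)
--     if n > m:
--         return "BG" * g + "B" * (b - g)
--     return "GB" * b + "G" * (g - b)
-- ===== Notes on version B (the rewrite author's own statement) =====
-- stated objective: simpler
-- what changed: Replaces the repeat/zip_longest iterator interleave with a closed-form string: min(n,m) alternating pairs by string repetition plus the surplus of the majority character.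
import Mathlib
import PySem

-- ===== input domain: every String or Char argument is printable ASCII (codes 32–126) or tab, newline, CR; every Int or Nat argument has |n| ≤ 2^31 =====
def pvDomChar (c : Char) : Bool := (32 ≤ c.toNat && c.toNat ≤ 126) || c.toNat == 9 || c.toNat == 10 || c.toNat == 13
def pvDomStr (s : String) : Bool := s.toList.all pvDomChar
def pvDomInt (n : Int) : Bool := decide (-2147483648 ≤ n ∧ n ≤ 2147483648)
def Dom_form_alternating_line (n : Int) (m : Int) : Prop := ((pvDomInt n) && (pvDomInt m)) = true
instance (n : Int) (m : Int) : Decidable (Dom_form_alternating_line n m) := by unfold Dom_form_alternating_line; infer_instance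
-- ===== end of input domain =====

-- B replaces the repeat/zip_longest iterator interleave with a closed-form string
-- built by repetition: min pairs + the surplus of the majority character (objective: simpler).

-- ===== PORT A =====
-- zip_longest(xs, ys, fillvalue=None)
def pvZipLongest (xs ys : List Char) : List (Option Char × Option Char) :=
  match xs, ys with
  | [], [] => []
  | x :: xs', [] => (some x, none) :: pvZipLongest xs' []
  | [], y :: ys' => (none, some y) :: pvZipLongest [] ys'
  | x :: xs', y :: ys' => (some x, some y) :: pvZipLongest xs' ys'

-- (y for x in pairs for y in x if y is not None)
def pvFlattenPairs (ps : List (Option Char × Option Char)) : List Char :=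
  ps.flatMap (fun p => [p.1, p.2].filterMap id)

def form_alternating_line (n : Int) (m : Int) : String :=
  let boys := List.replicate n.toNat 'B'      -- repeat('B', n): empty for n ≤ 0
  let girls := List.replicate m.toNat 'G'
  let pairs := if n > m then pvZipLongest boys girls else pvZipLongest girls boys
  String.ofList (pvFlattenPairs pairs)            -- ''.join(result)

-- ===== PORT B =====
-- "s" * k for Python string repetition (empty for k ≤ 0)
def pvStrMul (s : List Char) (k : Int) : List Char := (List.replicate k.toNat s).flatten

def form_alternating_line_alt (n : Int) (m : Int) : String :=
  let b := max n 0
  let g := max m 0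
  if n > m then String.ofList (pvStrMul ['B', 'G'] g ++ pvStrMul ['B'] (b - g))
  else String.ofList (pvStrMul ['G', 'B'] b ++ pvStrMul ['G'] (g - b))

-- ===== PRECONDITION & SPEC =====
def Spec_form_alternating_line (n : Int) (m : Int) (out : String) : Prop := out = form_alternating_line_alt n m
instance (n : Int) (m : Int) (out : String) : Decidable (Spec_form_alternating_line n m out) := by unfold Spec_form_alternating_line; infer_instance

-- ===== CLAIM (what is proved, stated in full; the proofs are below) =====
def Claim_equal_form_alternating_line : Prop := ∀ (n : Int) (m : Int), Dom_form_alternating_line n m → Spec_form_alternating_line n m (form_alternating_line n m)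

-- ===== LEMMAS AND PROOFS =====
lemma zl_nil_right (xs : List Char) :
    pvFlattenPairs (pvZipLongest xs []) = xs := by
  induction xs with
  | nil => simp [pvZipLongest, pvFlattenPairs]
  | cons x xs ih => simp [pvZipLongest, pvFlattenPairs, List.flatMap_cons] at ih ⊢; exact ih

-- main shape: b ≤ a pairs of (c,d), then surplus of c
lemma zl_replicate (c d : Char) (b a : Nat) (h : b ≤ a) :
    pvFlattenPairs (pvZipLongest (List.replicate a c) (List.replicate b d)) =
      (List.replicate b [c, d]).flatten ++ List.replicate (a - b) c := by
  induction b generalizing a with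
  | zero => simpa using zl_nil_right (List.replicate a c)
  | succ b ih =>
    obtain ⟨a', rfl⟩ : ∃ a', a = a' + 1 := ⟨a - 1, by omega⟩
    have step : pvFlattenPairs (pvZipLongest (List.replicate (a' + 1) c) (List.replicate (b + 1) d))
        = c :: d :: pvFlattenPairs (pvZipLongest (List.replicate a' c) (List.replicate b d)) := by
      simp [List.replicate_succ, pvZipLongest, pvFlattenPairs]
    rw [step, ih a' (by omega), List.replicate_succ, List.flatten_cons]
    rw [show a' + 1 - (b + 1) = a' - b by omega]
    simp

lemma strMul_eq (s : List Char) (k : Int) :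
    pvStrMul s k = (List.replicate k.toNat s).flatten := rfl

-- ===== VERDICT (by name: the statement is the Claim_ definition above) =====
theorem form_alternating_line_spec : Claim_equal_form_alternating_line := by
  intro n m _
  show _ = _
  unfold form_alternating_line form_alternating_line_alt
  by_cases h : n > m
  · simp only [if_pos h]
    rw [zl_replicate 'B' 'G' m.toNat n.toNat (by omega)]
    congr 1
    rw [strMul_eq, strMul_eq]
    have h1 : (max m 0).toNat = m.toNat := by omega
    have h2 : (max n 0 - max m 0).toNat = n.toNat - m.toNat := by omega
    rw [h1, h2]
    simp [List.flatten_replicate_singleton]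
  · simp only [if_neg h]
    rw [zl_replicate 'G' 'B' n.toNat m.toNat (by omega)]
    congr 1
    rw [strMul_eq, strMul_eq]
    have h1 : (max n 0).toNat = n.toNat := by omega
    have h2 : (max m 0 - max n 0).toNat = m.toNat - n.toNat := by omega
    rw [h1, h2]
    simp [List.flatten_replicate_singleton]
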